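-- pv_equiv track=rewrite | github.com/sabernstein/omnibuster | omnibuster.py | getCrumbs
-- ===== SOURCE A (Python) =====
-- def getCrumbs(this_identifier):
--     # d = division
--     # t = title
--     # st = subtitle
--     # pt = part
--     # spt = subpart
--     # s = section
--     crumbs = []
--
--     for i in this_identifier.split('/'):
--         this_crumb = ''
--
--         if (i.find('d', 0, 1) == 0):
--             this_crumb = 'Division %s' % i[1:]
--             crumbs.append(this_crumb)
--
--         elif (i.find('t', 0, 1) == 0):
--             this_crumb = 'Title %s' % i[1:]
--             crumbs.append(this_crumb)
--
--         elif (i.find('st', 0, 2) == 0):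
--             this_crumb = 'Subtitle %s' % i[2:]
--             crumbs.append(this_crumb)
--
--         elif (i.find('pt', 0, 2) == 0):
--             this_crumb = 'Part %s' % i[2:]
--             crumbs.append(this_crumb)
--
--         elif (i.find('spt', 0, 3) == 0):
--             this_crumb = 'Subpart %s' % i[3:]
--             crumbs.append(this_crumb)
--
--         elif (i.find('s', 0, 3) == 0):
--             this_crumb = 'Section %s' % i[1:]
--             crumbs.append(this_crumb)
--
--     return crumbs
-- ===== SOURCE B (Python) =====
-- # Single char-level scan (no split()) with a trie-shaped character decision
-- # tree replacing the six substring-find tests; objective: alternative.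
--
-- def _crumb(tok):
--     # tok: list of the segment's characters; decision tree on individual chars
--     if not tok:
--         return None
--     c0 = tok[0]
--     if c0 == 'd':
--         return 'Division ' + ''.join(tok[1:])
--     if c0 == 't':
--         return 'Title ' + ''.join(tok[1:])
--     if c0 == 'p':
--         if tok[1:2] == ['t']:
--             return 'Part ' + ''.join(tok[2:])
--         return None
--     if c0 == 's':
--         if tok[1:2] == ['t']:
--             return 'Subtitle ' + ''.join(tok[2:])
--         if tok[1:3] == ['p', 't']:
--             return 'Subpart ' + ''.join(tok[3:])
--         return 'Section ' + ''.join(tok[1:])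
--     return None
--
-- def getCrumbs(this_identifier):
--     crumbs = []
--     tok = []
--     for ch in this_identifier:
--         if ch == '/':
--             c = _crumb(tok)
--             if c is not None:
--                 crumbs.append(c)
--             tok = []
--         else:
--             tok.append(ch)
--     c = _crumb(tok)
--     if c is not None:
--         crumbs.append(c)
--     return crumbs
-- ===== Notes on version B (the rewrite author's own statement) =====
-- stated objective: alternative
-- what changed: B never calls split(): it makes one character-level pass over the identifier with a running token accumulator, flushing the token at each slash separator, and classifies each segment by a trie-shaped decision tree on its first characters instead of A's six ordered substring-find prefix tests.
import Mathlib
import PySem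

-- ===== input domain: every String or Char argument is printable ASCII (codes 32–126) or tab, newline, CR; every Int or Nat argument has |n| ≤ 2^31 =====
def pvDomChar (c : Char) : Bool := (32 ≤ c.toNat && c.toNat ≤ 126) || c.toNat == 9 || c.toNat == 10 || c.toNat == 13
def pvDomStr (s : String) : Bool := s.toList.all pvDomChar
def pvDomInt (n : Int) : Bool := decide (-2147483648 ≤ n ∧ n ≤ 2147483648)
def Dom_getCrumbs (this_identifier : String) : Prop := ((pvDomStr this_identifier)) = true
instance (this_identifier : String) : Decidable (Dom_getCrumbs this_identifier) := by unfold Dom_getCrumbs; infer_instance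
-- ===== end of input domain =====

-- B replaces A's split()-then-six-substring-find pass by a single character-level
-- scan with a running token and a trie-shaped character decision tree (objective: alternative).

-- ===== PORT A =====
-- i.split('/') with non-empty separator never raises: split? "/" is always `some`, the getD default is never used
def getCrumbs (this_identifier : String) : List String :=
  ((PySem.Str.split? this_identifier "/").getD []).foldl
    (fun crumbs i =>
      if PySem.Str.findFrom i "d" 0 (some 1) = 0 then
        crumbs ++ ["Division " ++ PySem.Str.slice i (some 1) none]
      else if PySem.Str.findFrom i "t" 0 (some 1) = 0 then
        crumbs ++ ["Title " ++ PySem.Str.slice i (some 1) none]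
      else if PySem.Str.findFrom i "st" 0 (some 2) = 0 then
        crumbs ++ ["Subtitle " ++ PySem.Str.slice i (some 2) none]
      else if PySem.Str.findFrom i "pt" 0 (some 2) = 0 then
        crumbs ++ ["Part " ++ PySem.Str.slice i (some 2) none]
      else if PySem.Str.findFrom i "spt" 0 (some 3) = 0 then
        crumbs ++ ["Subpart " ++ PySem.Str.slice i (some 3) none]
      else if PySem.Str.findFrom i "s" 0 (some 3) = 0 then
        crumbs ++ ["Section " ++ PySem.Str.slice i (some 1) none]
      else crumbs) []

-- ===== PORT B =====
-- Source B's _crumb: decision tree on the segment's individual characters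
-- (tok = c :: r, so tok[1:2] = r.take 1, tok[2:] = r.drop 1, tok[1:3] = r.take 2, tok[3:] = r.drop 2, tok[1:] = r)
def pvCrumb : List Char → Option String
  | [] => none
  | c :: r =>
    if c = 'd' then some ("Division " ++ String.ofList r)
    else if c = 't' then some ("Title " ++ String.ofList r)
    else if c = 'p' then
      if r.take 1 = ['t'] then some ("Part " ++ String.ofList (r.drop 1)) else none
    else if c = 's' then
      if r.take 1 = ['t'] then some ("Subtitle " ++ String.ofList (r.drop 1))
      else if r.take 2 = ['p', 't'] then some ("Subpart " ++ String.ofList (r.drop 2))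
      else some ("Section " ++ String.ofList r)
    else none

-- Source B's main loop: one pass over the characters, flushing the token at each '/'
def getCrumbs_alt (this_identifier : String) : List String :=
  let st := this_identifier.toList.foldl
    (fun (st : List String × List Char) ch =>
      if ch = '/' then
        (match pvCrumb st.2 with | some c => st.1 ++ [c] | none => st.1, [])
      else (st.1, st.2 ++ [ch])) ([], [])
  match pvCrumb st.2 with | some c => st.1 ++ [c] | none => st.1

-- ===== PRECONDITION & SPEC =====
def Spec_getCrumbs (this_identifier : String) (out : List String) : Prop := out = getCrumbs_alt this_identifier
instance (this_identifier : String) (out : List String) : Decidable (Spec_getCrumbs this_identifier out) := by unfold Spec_getCrumbs; infer_instance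

-- ===== CLAIM (what is proved, stated in full; the proofs are below) =====
def Claim_equal_getCrumbs : Prop := ∀ (this_identifier : String), Dom_getCrumbs this_identifier → Spec_getCrumbs this_identifier (getCrumbs this_identifier)

-- ===== LEMMAS AND PROOFS =====

-- appending a segment's crumb (if any): the common denominator of both folds
def pvStep (crumbs : List String) (l : List Char) : List String :=
  match pvCrumb l with | some c => crumbs ++ [c] | none => crumbs

-- pure split of a char list on '/', with the pending token as accumulator
def pvSeg : List Char → List Char → List (List Char)
  | tok, [] => [tok]
  | tok, c :: r => if c = '/' then tok :: pvSeg [] r else pvSeg (tok ++ [c]) r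

theorem pvGo_eq (fuel : Nat) : ∀ (l cur : List Char) (accs : List (List Char)),
    l.length ≤ fuel →
    PySem.Chars.splitOn.go ['/'] fuel l cur accs = accs.reverse ++ pvSeg cur.reverse l := by
  induction fuel with
  | zero =>
    intro l cur accs hl
    have h0 : l = [] := List.length_eq_zero_iff.mp (Nat.le_zero.mp hl)
    subst h0
    simp [PySem.Chars.splitOn.go, pvSeg]
  | succ fuel ih =>
    intro l cur accs hl
    rcases l with _ | ⟨c, rest⟩
    · simp [PySem.Chars.splitOn.go, pvSeg]
    · rw [PySem.Chars.splitOn.go]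
      by_cases hc : c = '/'
      · have hp : List.isPrefixOf ['/'] (c :: rest) = true := by
          subst hc; simp [List.isPrefixOf]
        rw [if_pos hp]
        simp only [List.length_cons] at hl
        rw [ih _ _ _ (by simpa using Nat.le_of_succ_le_succ hl)]
        simp [pvSeg, hc]
      · have hp : ¬ (List.isPrefixOf ['/'] (c :: rest) = true) := by
          simp [List.isPrefixOf]
          intro h; exact absurd h.symm hc
        rw [if_neg hp]
        simp only [List.length_cons] at hl
        rw [ih _ _ _ (Nat.le_of_succ_le_succ hl)]
        simp [pvSeg, hc]

theorem splitOn_slash (cs : List Char) : PySem.Chars.splitOn cs ['/'] = pvSeg [] cs := by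
  unfold PySem.Chars.splitOn
  rw [pvGo_eq _ _ _ _ (by omega)]
  rfl

theorem find_eq_zero_iff (l sub : List Char) : PySem.Chars.find l sub = 0 ↔ sub <+: l := by
  constructor
  · intro h
    have := PySem.Chars.find_spec (s := l) (sub := sub) (by omega)
    rw [h] at this
    simpa using this.1
  · intro h
    have hnn : 0 ≤ PySem.Chars.find l sub := by
      rw [PySem.Chars.find_nonneg_iff]
      exact h.isInfix
    have hspec := PySem.Chars.find_spec (s := l) (sub := sub) hnn
    by_contra hne
    have hpos : 0 < (PySem.Chars.find l sub).toNat := by omega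
    have := hspec.2 0 hpos
    simp at this
    exact this h

theorem findFrom_some_eq_zero_iff (cs sub : List Char) (k : Nat) :
    PySem.Chars.findFrom cs sub 0 (some (k : Int)) = 0 ↔ sub <+: cs.take k := by
  have hk0 : ¬ ((k : Int) < 0) := by omega
  unfold PySem.Chars.findFrom
  simp only [if_neg hk0, if_neg (show ¬ ((0:Int) < 0) by decide), Int.toNat_zero, List.drop_zero]
  have htake : List.take (if (cs.length : Int) < (k : Int) then (cs.length : Int) else (k : Int)).toNat cs = cs.take k := by
    split_ifs with h
    · rw [Int.toNat_natCast, List.take_length, List.take_of_length_le (by exact_mod_cast h.le)]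
    · rw [Int.toNat_natCast]
  rw [htake]
  have h2 : ¬ ((if (cs.length : Int) < (k : Int) then (cs.length : Int) else (k : Int)) < 0) := by
    split_ifs <;> omega
  rw [if_neg h2]
  split_ifs with h3
  · simp only [false_iff]
    rw [PySem.Chars.find_eq_neg_one_iff] at h3
    exact fun hp => h3 hp.isInfix
  · rw [zero_add, find_eq_zero_iff]

theorem cond1 (cs : List Char) (c : Char) :
    PySem.Chars.findFrom cs [c] 0 (some (1 : Int)) = 0 ↔ cs.take 1 = [c] := by
  rw [show (1 : Int) = ((1 : Nat) : Int) from rfl, findFrom_some_eq_zero_iff]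
  exact ⟨fun h => (h.eq_of_length_le (by simp)).symm, fun h => by rw [h]⟩

theorem cond2 (cs : List Char) (c d : Char) :
    PySem.Chars.findFrom cs [c, d] 0 (some (2 : Int)) = 0 ↔ cs.take 2 = [c, d] := by
  rw [show (2 : Int) = ((2 : Nat) : Int) from rfl, findFrom_some_eq_zero_iff]
  exact ⟨fun h => (h.eq_of_length_le (by simp)).symm, fun h => by rw [h]⟩

theorem cond3 (cs : List Char) (c d e : Char) :
    PySem.Chars.findFrom cs [c, d, e] 0 (some (3 : Int)) = 0 ↔ cs.take 3 = [c, d, e] := by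
  rw [show (3 : Int) = ((3 : Nat) : Int) from rfl, findFrom_some_eq_zero_iff]
  exact ⟨fun h => (h.eq_of_length_le (by simp)).symm, fun h => by rw [h]⟩

theorem cond_s3 (cs : List Char) (c : Char) :
    PySem.Chars.findFrom cs [c] 0 (some (3 : Int)) = 0 ↔ cs.take 1 = [c] := by
  rw [show (3 : Int) = ((3 : Nat) : Int) from rfl, findFrom_some_eq_zero_iff, List.prefix_take_iff]
  rw [show ([c] <+: cs ↔ [c] <+: cs.take 1) from by rw [List.prefix_take_iff]; simp]
  exact ⟨fun h => (h.1.eq_of_length_le (by simp)).symm, fun h => ⟨by rw [h], by simp⟩⟩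

theorem sliceD1 (l : List Char) : PySem.List.slice l (some (1:Int)) none = l.drop 1 := by
  rw [PySem.List.slice_from l (by omega : (0:Int) ≤ 1)]; rfl
theorem sliceD2 (l : List Char) : PySem.List.slice l (some (2:Int)) none = l.drop 2 := by
  rw [PySem.List.slice_from l (by omega : (0:Int) ≤ 2)]; rfl
theorem sliceD3 (l : List Char) : PySem.List.slice l (some (3:Int)) none = l.drop 3 := by
  rw [PySem.List.slice_from l (by omega : (0:Int) ≤ 3)]; rfl

theorem bodyA_eq (crumbs : List String) (i : String) :
    (if PySem.Str.findFrom i "d" 0 (some 1) = 0 then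
        crumbs ++ ["Division " ++ PySem.Str.slice i (some 1) none]
      else if PySem.Str.findFrom i "t" 0 (some 1) = 0 then
        crumbs ++ ["Title " ++ PySem.Str.slice i (some 1) none]
      else if PySem.Str.findFrom i "st" 0 (some 2) = 0 then
        crumbs ++ ["Subtitle " ++ PySem.Str.slice i (some 2) none]
      else if PySem.Str.findFrom i "pt" 0 (some 2) = 0 then
        crumbs ++ ["Part " ++ PySem.Str.slice i (some 2) none]
      else if PySem.Str.findFrom i "spt" 0 (some 3) = 0 then
        crumbs ++ ["Subpart " ++ PySem.Str.slice i (some 3) none]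
      else if PySem.Str.findFrom i "s" 0 (some 3) = 0 then
        crumbs ++ ["Section " ++ PySem.Str.slice i (some 1) none]
      else crumbs) = pvStep crumbs i.toList := by
  have hslice : ∀ (k : Int), PySem.Str.slice i (some k) none = String.ofList (PySem.List.slice i.toList (some k) none) := fun k => by
    simp only [PySem.Str.slice, PySem.Chars.slice_eq_listSlice]
  simp only [PySem.Str.findFrom_eq, hslice,
    show ("d" : String).toList = ['d'] from rfl, show ("t" : String).toList = ['t'] from rfl,
    show ("st" : String).toList = ['s', 't'] from rfl, show ("pt" : String).toList = ['p', 't'] from rfl,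
    show ("spt" : String).toList = ['s', 'p', 't'] from rfl, show ("s" : String).toList = ['s'] from rfl,
    cond1, cond2, cond3, cond_s3, sliceD1, sliceD2, sliceD3, pvStep]
  generalize i.toList = l
  rcases l with _ | ⟨a, _ | ⟨b, _ | ⟨c, r⟩⟩⟩
  · simp [pvCrumb]
  · by_cases had : a = 'd' <;> by_cases hat : a = 't' <;> by_cases has : a = 's' <;>
      by_cases hap : a = 'p' <;>
      simp_all [pvCrumb]
  · by_cases had : a = 'd' <;> by_cases hat : a = 't' <;> by_cases has : a = 's' <;>
      by_cases hap : a = 'p' <;> by_cases hbt : b = 't' <;>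
      simp_all [pvCrumb]
  · by_cases had : a = 'd' <;> by_cases hat : a = 't' <;> by_cases has : a = 's' <;>
      by_cases hap : a = 'p' <;> by_cases hbt : b = 't' <;> by_cases hbp : b = 'p' <;>
      by_cases hct : c = 't' <;>
      simp_all [pvCrumb]

theorem getCrumbs_eq_fold (s : String) :
    getCrumbs s = (pvSeg [] s.toList).foldl pvStep [] := by
  unfold getCrumbs
  have hs : PySem.Str.split? s "/" = some ((pvSeg [] s.toList).map String.ofList) := by
    simp [PySem.Str.split?, PySem.Chars.split?, splitOn_slash,
      show ("/" : String).toList = ['/'] from rfl]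
  rw [hs]
  simp only [Option.getD_some, List.foldl_map]
  congr 1
  funext crumbs l
  rw [bodyA_eq, String.toList_ofList]

theorem altFold_eq (cs : List Char) : ∀ (crumbs : List String) (tok : List Char),
    (match pvCrumb (cs.foldl
        (fun (st : List String × List Char) ch =>
          if ch = '/' then
            (match pvCrumb st.2 with | some c => st.1 ++ [c] | none => st.1, [])
          else (st.1, st.2 ++ [ch])) (crumbs, tok)).2 with
      | some c => (cs.foldl
        (fun (st : List String × List Char) ch =>
          if ch = '/' then
            (match pvCrumb st.2 with | some c => st.1 ++ [c] | none => st.1, [])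
          else (st.1, st.2 ++ [ch])) (crumbs, tok)).1 ++ [c]
      | none => (cs.foldl
        (fun (st : List String × List Char) ch =>
          if ch = '/' then
            (match pvCrumb st.2 with | some c => st.1 ++ [c] | none => st.1, [])
          else (st.1, st.2 ++ [ch])) (crumbs, tok)).1) =
    (pvSeg tok cs).foldl pvStep crumbs := by
  induction cs with
  | nil => simp [pvSeg, pvStep]
  | cons c r ih =>
    intro crumbs tok
    by_cases hc : c = '/'
    · simp only [List.foldl_cons, pvSeg, hc]
      rw [ih]
      rfl
    · simp only [List.foldl_cons, pvSeg, if_neg hc]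
      exact ih crumbs (tok ++ [c])

theorem alt_eq_fold (s : String) :
    getCrumbs_alt s = (pvSeg [] s.toList).foldl pvStep [] := by
  have h := altFold_eq s.toList [] []
  unfold getCrumbs_alt
  exact h

-- ===== VERDICT (by name: the statement is the Claim_ definition above) =====
theorem getCrumbs_spec : Claim_equal_getCrumbs := by
  intro s _
  unfold Spec_getCrumbs
  rw [getCrumbs_eq_fold, alt_eq_fold]
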